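-- pv_equiv track=rewrite | github.com/williamgki/reviewer | ddl_sampler_ephemeral.py | _deduplicate_corpus_concepts
-- ===== SOURCE A (Python) =====
-- from typing import List, Dict, Tuple, Any, Set
-- from collections import defaultdict
--
-- def _deduplicate_corpus_concepts(concepts: List[Dict[str, Any]]) -> List[Dict[str, Any]]:
--     """Remove duplicate concepts, keeping the best context snippet."""
--     concept_groups = defaultdict(list)
--
--     # Group by concept name
--     for concept in concepts:
--         concept_groups[concept['concept']].append(concept)
--
--     # Keep best example of each concept
--     deduplicated = []
--     for concept_name, group in concept_groups.items():
--         # Sort by snippet length and informativeness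
--         best_concept = max(group, key=lambda x: len(x['snippet']))
--         deduplicated.append(best_concept)
--
--     return deduplicated
-- ===== SOURCE B (Python) =====
-- def _deduplicate_corpus_concepts(concepts):
--     """Remove duplicate concepts, keeping the best context snippet."""
--     best = {}
--     for concept in concepts:
--         name = concept['concept']
--         current = best.get(name)
--         if current is None or len(concept['snippet']) > len(current['snippet']):
--             best[name] = concept
--     return list(best.values())
-- ===== Notes on version B (the rewrite author's own statement) =====
-- stated objective: simpler
-- what changed: Replaces A's two-phase group-by-name-then-max-per-group with a single pass that keeps a running best concept per name in one dict (strict > keeps the first-seen on snippet-length ties, matching max), returning the dict's values.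
import Mathlib
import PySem

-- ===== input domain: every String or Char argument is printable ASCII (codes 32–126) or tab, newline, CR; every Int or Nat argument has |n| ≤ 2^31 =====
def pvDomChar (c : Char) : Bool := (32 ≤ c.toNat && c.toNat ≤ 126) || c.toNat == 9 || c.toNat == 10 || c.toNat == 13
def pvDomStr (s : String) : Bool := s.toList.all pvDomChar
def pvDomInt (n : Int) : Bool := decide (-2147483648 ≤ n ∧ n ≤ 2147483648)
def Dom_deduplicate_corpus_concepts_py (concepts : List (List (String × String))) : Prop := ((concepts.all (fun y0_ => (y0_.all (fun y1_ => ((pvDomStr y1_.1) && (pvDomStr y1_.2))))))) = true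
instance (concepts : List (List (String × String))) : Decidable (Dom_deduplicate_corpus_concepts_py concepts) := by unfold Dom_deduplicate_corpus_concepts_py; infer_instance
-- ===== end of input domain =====

-- B replaces A's group-by-name-then-max-per-group with a single running-best-per-name pass (simpler, one pass).


-- shared trivial accessors: concept['concept'] / concept['snippet'] (total forms; Pre_ guarantees the keys are present)
def pvName (c : List (String × String)) : String := (PySem.Dict.mk c).getD "concept" ""
def pvSnip (c : List (String × String)) : String := (PySem.Dict.mk c).getD "snippet" ""

-- ===== PORT A =====
-- max(group, key=lambda x: len(x['snippet'])): Python max raises on an empty list; every group A builds is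
-- nonempty, so the .getD [] default is unreachable on A's groups.
def pvPickA (g : List (List (String × String))) : List (String × String) :=
  (PySem.List.max? g (fun x => PySem.Str.len (pvSnip x))).getD []

-- loop body of A's grouping pass: concept_groups[concept['concept']].append(concept)
def pvStepA (d : PySem.Dict String (List (List (String × String)))) (c : List (String × String)) :
    PySem.Dict String (List (List (String × String))) :=
  d.modify (pvName c) [] (· ++ [c])

def deduplicate_corpus_concepts_py (concepts : List (List (String × String))) : List (List (String × String)) :=
  let groups := concepts.foldl pvStepA PySem.Dict.empty
  -- for concept_name, group in concept_groups.items(): deduplicated.append(max(group, key=…))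
  groups.items.foldl (fun acc p => acc ++ [pvPickA p.2]) []

-- ===== PORT B =====
-- loop body of B's single pass: keep the running best concept per name (strict > keeps first on ties)
def pvStepB (d : PySem.Dict String (List (String × String))) (c : List (String × String)) :
    PySem.Dict String (List (String × String)) :=
  match d.get? (pvName c) with
  | none => d.insert (pvName c) c
  | some b => if PySem.Str.len (pvSnip b) < PySem.Str.len (pvSnip c) then d.insert (pvName c) c else d

def deduplicate_corpus_concepts_py_alt (concepts : List (List (String × String))) : List (List (String × String)) :=
  (concepts.foldl pvStepB PySem.Dict.empty).values

-- ===== PRECONDITION & SPEC =====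
-- Pre_ excludes concepts missing the 'concept' or 'snippet' key (Python raises KeyError there) and assoc lists
-- with duplicate keys inside one concept (a Python dict cannot have them, so they encode no Python input).
def Pre_deduplicate_corpus_concepts_py (concepts : List (List (String × String))) : Prop :=
  ∀ c ∈ concepts, (PySem.Dict.mk c).contains "concept" = true ∧ (PySem.Dict.mk c).contains "snippet" = true ∧ (c.map Prod.fst).Nodup
instance (concepts : List (List (String × String))) : Decidable (Pre_deduplicate_corpus_concepts_py concepts) := by unfold Pre_deduplicate_corpus_concepts_py; infer_instance
def pvWitness_deduplicate_corpus_concepts_py : (List (List (String × String))) :=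
  [[("concept", "a"), ("snippet", "xx")], [("concept", "a"), ("snippet", "y")], [("concept", "b"), ("snippet", "")]]

def Spec_deduplicate_corpus_concepts_py (concepts : List (List (String × String))) (out : List (List (String × String))) : Prop := out = deduplicate_corpus_concepts_py_alt concepts
instance (concepts : List (List (String × String))) (out : List (List (String × String))) : Decidable (Spec_deduplicate_corpus_concepts_py concepts out) := by unfold Spec_deduplicate_corpus_concepts_py; infer_instance

-- ===== CLAIM (what is proved, stated in full; the proofs are below) =====
def Claim_equal_deduplicate_corpus_concepts_py : Prop := ∀ (concepts : List (List (String × String))), Dom_deduplicate_corpus_concepts_py concepts → Pre_deduplicate_corpus_concepts_py concepts → Spec_deduplicate_corpus_concepts_py concepts (deduplicate_corpus_concepts_py concepts)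

-- ===== LEMMAS AND PROOFS =====

lemma pv_max?_append_singleton (g : List (List (String × String))) (c m : List (String × String))
    (hm : PySem.List.max? g (fun x => PySem.Str.len (pvSnip x)) = some m) :
    PySem.List.max? (g ++ [c]) (fun x => PySem.Str.len (pvSnip x)) =
      some (if PySem.Str.len (pvSnip m) < PySem.Str.len (pvSnip c) then c else m) := by
  simp only [PySem.List.max?] at hm ⊢
  rw [List.foldl_append, hm]
  simp [List.foldl]
  split <;> rfl

lemma pv_inv (l : List (List (String × String))) :
    ∀ (dg : PySem.Dict String (List (List (String × String)))) (db : PySem.Dict String (List (String × String))),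
    db.items = dg.items.map (fun p => (p.1, pvPickA p.2)) →
    (∀ p ∈ dg.items, p.2 ≠ ([] : List (List (String × String)))) →
    (dg.items.map Prod.fst).Nodup →
    (l.foldl pvStepB db).items = (l.foldl pvStepA dg).items.map (fun p => (p.1, pvPickA p.2)) ∧
    (∀ p ∈ (l.foldl pvStepA dg).items, p.2 ≠ ([] : List (List (String × String)))) ∧
    ((l.foldl pvStepA dg).items.map Prod.fst).Nodup := by
  induction l with
  | nil => exact fun dg db h1 h2 h3 => ⟨h1, h2, h3⟩
  | cons c l ih =>
    intro dg db h1 h2 h3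
    simp only [List.foldl_cons]
    have hc_eq : db.contains (pvName c) = dg.contains (pvName c) := by
      rw [PySem.Dict.contains, PySem.Dict.contains, h1, List.any_map]
      rfl
    have hget : db.get? (pvName c) = (dg.get? (pvName c)).map (fun g => pvPickA g) := by
      rw [PySem.Dict.get?, PySem.Dict.get?, h1, List.find?_map]
      have hq : ((fun p : String × List (String × String) => p.1 == pvName c) ∘
          (fun p : String × List (List (String × String)) => (p.1, pvPickA p.2))) =
          (fun p => p.1 == pvName c) := rfl
      rw [hq]
      cases List.find? (fun p => p.1 == pvName c) dg.items <;> rfl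
    by_cases hg : dg.contains (pvName c) = true
    · -- name already present
      have hsome : (dg.get? (pvName c)).isSome := by
        rw [← PySem.Dict.contains_eq_isSome_get?]; exact hg
      obtain ⟨g, hgg⟩ := Option.isSome_iff_exists.mp hsome
      have hmem : ((pvName c), g) ∈ dg.items := PySem.Dict.mem_items_of_get?_eq_some dg hgg
      have hgne : g ≠ [] := h2 _ hmem
      have hgd : dg.getD (pvName c) [] = g := PySem.Dict.getD_of_get?_eq_some dg [] hgg
      obtain ⟨m, hm⟩ : ∃ m, PySem.List.max? g (fun x => PySem.Str.len (pvSnip x)) = some m := by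
        cases e : PySem.List.max? g (fun x => PySem.Str.len (pvSnip x)) with
        | none => rw [PySem.List.max?_eq_none_iff] at e; exact absurd e hgne
        | some m => exact ⟨m, rfl⟩
      have hpick : pvPickA g = m := by unfold pvPickA; rw [hm]; rfl
      have hA : (pvStepA dg c).items =
          dg.items.map (fun p => if p.1 == pvName c then (pvName c, g ++ [c]) else p) := by
        simp only [pvStepA, PySem.Dict.modify, hgd]
        exact PySem.Dict.items_insert_of_contains _ _ hg
      have hbg : db.get? (pvName c) = some m := by rw [hget, hgg]; simp [hpick]
      have hpick2 : pvPickA (g ++ [c]) =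
          if PySem.Str.len (pvSnip m) < PySem.Str.len (pvSnip c) then c else m := by
        unfold pvPickA; rw [pv_max?_append_singleton g c m hm]; rfl
      have hkeys : (pvStepA dg c).items.map Prod.fst = dg.items.map Prod.fst := by
        rw [hA, List.map_map]
        apply List.map_congr_left; intro p hp
        simp only [Function.comp]
        split
        · next hpn => exact (eq_of_beq hpn).symm
        · rfl
      have hne' : ∀ p ∈ (pvStepA dg c).items, p.2 ≠ ([] : List (List (String × String))) := by
        intro p hp
        rw [hA] at hp
        obtain ⟨q, hq, rfl⟩ := List.mem_map.mp hp
        split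
        · simp
        · exact h2 _ hq
      have hnd' : ((pvStepA dg c).items.map Prod.fst).Nodup := by rw [hkeys]; exact h3
      have hrel' : (pvStepB db c).items = (pvStepA dg c).items.map (fun p => (p.1, pvPickA p.2)) := by
        by_cases hlt : PySem.Str.len (pvSnip m) < PySem.Str.len (pvSnip c)
        · have hltn : (pvSnip m).length < (pvSnip c).length := by
            simpa [PySem.Str.len] using hlt
          have hcb : db.contains (pvName c) = true := by rw [hc_eq]; exact hg
          have hB : pvStepB db c = db.insert (pvName c) c := by
            unfold pvStepB; rw [hbg]; dsimp only; rw [if_pos hlt]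
          rw [hB, PySem.Dict.items_insert_of_contains _ _ hcb, h1, hA, List.map_map, List.map_map]
          apply List.map_congr_left; intro p hp
          by_cases hpn : (p.1 == pvName c) = true
          · simp [Function.comp, hpn, hpick2, hltn]
          · simp [Function.comp, hpn]
        · have hltn : ¬ (pvSnip m).length < (pvSnip c).length := by
            simpa [PySem.Str.len] using hlt
          have hB : pvStepB db c = db := by
            unfold pvStepB; rw [hbg]; dsimp only; rw [if_neg hlt]
          rw [hB, h1, hA, List.map_map]
          apply List.map_congr_left; intro p hp
          by_cases hpn : (p.1 == pvName c) = true
          · have hpeq : p = (pvName c, g) :=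
              List.inj_on_of_nodup_map h3 hp hmem (by simp [eq_of_beq hpn])
            subst hpeq
            simp [Function.comp, hpick2, hltn, hpick]
          · simp [Function.comp, hpn]
      exact ih _ _ hrel' hne' hnd'
    · -- fresh name
      have hg' : dg.contains (pvName c) = false := by simpa using hg
      have hgd : dg.getD (pvName c) [] = [] := PySem.Dict.getD_of_not_contains dg [] hg'
      have hA : (pvStepA dg c).items = dg.items ++ [(pvName c, [c])] := by
        simp only [pvStepA, PySem.Dict.modify, hgd]
        simpa using PySem.Dict.items_insert_of_not_contains _ _ hg'
      have hbnone : db.get? (pvName c) = none := by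
        rw [hget]
        have hdg : dg.get? (pvName c) = none := by
          cases e : dg.get? (pvName c) with
          | none => rfl
          | some g => rw [PySem.Dict.contains_eq_isSome_get?, e] at hg'; simp at hg'
        rw [hdg]; rfl
      have hcb : db.contains (pvName c) = false := by rw [hc_eq]; exact hg'
      have hB : (pvStepB db c).items = db.items ++ [(pvName c, c)] := by
        unfold pvStepB; rw [hbnone]
        exact PySem.Dict.items_insert_of_not_contains _ _ hcb
      have hnotmem : pvName c ∉ dg.items.map Prod.fst := by
        simp only [PySem.Dict.contains, List.any_eq_false] at hg'
        intro hmem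
        obtain ⟨p, hp, hp1⟩ := List.mem_map.mp hmem
        exact absurd (beq_iff_eq.mpr hp1) (by simpa using hg' p hp)
      have hrel' : (pvStepB db c).items = (pvStepA dg c).items.map (fun p => (p.1, pvPickA p.2)) := by
        rw [hB, hA, h1, List.map_append]
        rfl
      have hne' : ∀ p ∈ (pvStepA dg c).items, p.2 ≠ ([] : List (List (String × String))) := by
        intro p hp
        rw [hA] at hp
        rcases List.mem_append.mp hp with h | h
        · exact h2 _ h
        · simp at h; subst h; simp
      have hnd' : ((pvStepA dg c).items.map Prod.fst).Nodup := by
        rw [hA, List.map_append]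
        simp only [List.map_cons, List.map_nil]
        refine List.nodup_append.mpr ⟨h3, List.nodup_singleton _, ?_⟩
        intro a ha b hb
        rw [List.mem_singleton] at hb
        subst hb
        exact fun h => hnotmem (h ▸ ha)
      exact ih _ _ hrel' hne' hnd'

theorem pv_main (concepts : List (List (String × String))) :
    deduplicate_corpus_concepts_py concepts = deduplicate_corpus_concepts_py_alt concepts := by
  obtain ⟨hrel, -, -⟩ := pv_inv concepts PySem.Dict.empty PySem.Dict.empty rfl (by simp [PySem.Dict.empty]) (by simp [PySem.Dict.empty])
  unfold deduplicate_corpus_concepts_py deduplicate_corpus_concepts_py_alt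
  rw [PySem.List.foldl_append_singleton_eq_map]
  simp [PySem.Dict.values, hrel, List.map_map, Function.comp]

-- ===== VERDICT (by name: the statement is the Claim_ definition above) =====
theorem deduplicate_corpus_concepts_py_spec : Claim_equal_deduplicate_corpus_concepts_py := by
  intro concepts _ _
  unfold Spec_deduplicate_corpus_concepts_py
  exact pv_main concepts
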